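-- pv_equiv track=rewrite | github.com/Shinyhash/python-tasks | 3 - One-Dimensional Arrays/3.13.py | double_elements_and_count_negatives
-- ===== SOURCE A (Python) =====
-- def double_elements_and_count_negatives(R):
--     S = []
--     negative_count = 0
--
--     for i in range(len(R)):
--         if R[i] < 0:
--             negative_count += 1
--         S.append(R[i] * 2)
--
--     return S, negative_count
-- ===== SOURCE B (Python) =====
-- def double_elements_and_count_negatives(R):
--     # divide and conquer: split in half, solve each half, concatenate/add results
--     if len(R) <= 1:
--         if not R:
--             return [], 0
--         x = R[0]
--         return [x * 2], (1 if x < 0 else 0)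
--     mid = len(R) // 2
--     ls, ln = double_elements_and_count_negatives(R[:mid])
--     rs, rn = double_elements_and_count_negatives(R[mid:])
--     return ls + rs, ln + rn
-- ===== Notes on version B (the rewrite author's own statement) =====
-- stated objective: alternative
-- what changed: Replaces A's single fused index loop with a divide-and-conquer recursion: split the list in half, recursively double/count each half, then concatenate the lists and add the counts.
import Mathlib
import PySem

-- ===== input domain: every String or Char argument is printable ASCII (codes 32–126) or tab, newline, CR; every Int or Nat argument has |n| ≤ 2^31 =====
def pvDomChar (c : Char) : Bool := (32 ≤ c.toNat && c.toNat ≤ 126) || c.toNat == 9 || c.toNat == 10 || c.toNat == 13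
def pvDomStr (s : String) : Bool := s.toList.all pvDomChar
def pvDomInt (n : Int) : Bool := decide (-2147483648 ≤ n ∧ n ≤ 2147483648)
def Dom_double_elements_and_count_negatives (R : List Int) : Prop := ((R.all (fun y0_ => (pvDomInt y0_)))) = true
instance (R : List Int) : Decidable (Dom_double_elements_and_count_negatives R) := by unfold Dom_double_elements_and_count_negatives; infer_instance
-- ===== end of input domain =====

-- B replaces A's single fused index loop with a divide-and-conquer recursion (split in half, combine); same result, a genuinely different algorithm, not claimed faster.

-- ===== PORT A =====
-- for i in range(len(R)): if R[i] < 0: negative_count += 1; S.append(R[i]*2)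
def double_elements_and_count_negatives (R : List Int) : List Int × Int :=
  let init : List Int × Int := ([], 0)
  let res := (PySem.List.pyRange 0 (PySem.List.len R) 1).foldl
    (fun acc i =>
      (acc.1 ++ [PySem.List.pyGetD R i 0 * 2],
       if PySem.List.pyGetD R i 0 < 0 then acc.2 + 1 else acc.2)) init
  res

-- ===== PORT B =====
-- if len(R) <= 1: base case; else recurse on R[:mid] and R[mid:], mid = len(R)//2
def double_elements_and_count_negatives_alt (R : List Int) : List Int × Int :=
  if hlen : R.length ≤ 1 then
    match R with
    | [] => ([], 0)
    | x :: _ => ([x * 2], if x < 0 then 1 else 0)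
  else
    let mid : Nat := R.length / 2
    let l := double_elements_and_count_negatives_alt (PySem.List.slice R none (some (mid : Int)))
    let r := double_elements_and_count_negatives_alt (PySem.List.slice R (some (mid : Int)) none)
    (l.1 ++ r.1, l.2 + r.2)
termination_by R.length
decreasing_by
  · rw [PySem.List.slice_to_natCast]
    simp only [List.length_take]
    omega
  · rw [PySem.List.slice_from_natCast]
    simp only [List.length_drop]
    omega

-- ===== PRECONDITION & SPEC =====
def Spec_double_elements_and_count_negatives (R : List Int) (out : List Int × Int) : Prop := out = double_elements_and_count_negatives_alt R
instance (R : List Int) (out : List Int × Int) : Decidable (Spec_double_elements_and_count_negatives R out) := by unfold Spec_double_elements_and_count_negatives; infer_instance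

-- ===== CLAIM (what is proved, stated in full; the proofs are below) =====
def Claim_equal_double_elements_and_count_negatives : Prop := ∀ (R : List Int), Dom_double_elements_and_count_negatives R → Spec_double_elements_and_count_negatives R (double_elements_and_count_negatives R)

-- ===== LEMMAS AND PROOFS =====

-- characterisation of B's divide-and-conquer result, by strong induction on length
theorem alt_eq_map_countP (R : List Int) :
    double_elements_and_count_negatives_alt R
    = (R.map (fun x => x * 2), (R.countP (fun x => decide (x < 0)) : Int)) := by
  induction hn : R.length using Nat.strong_induction_on generalizing R with
  | _ n ih =>
  rw [double_elements_and_count_negatives_alt]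
  by_cases hlen : R.length ≤ 1
  · rw [dif_pos hlen]
    match R, hlen with
    | [], _ => simp
    | [x], _ => simp
  · rw [dif_neg hlen]
    simp only [PySem.List.slice_to_natCast, PySem.List.slice_from_natCast]
    rw [ih (R.take (R.length / 2)).length (by simp; omega) _ rfl,
        ih (R.drop (R.length / 2)).length (by simp; omega) _ rfl]
    refine Prod.ext ?_ ?_
    · simp only
      rw [← List.map_append, List.take_append_drop]
    · simp only
      conv_rhs => rw [show R = R.take (R.length / 2) ++ R.drop (R.length / 2) from (List.take_append_drop _ _).symm]
      rw [List.countP_append]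
      push_cast
      ring

-- ===== VERDICT (by name: the statement is the Claim_ definition above) =====
theorem double_elements_and_count_negatives_spec : Claim_equal_double_elements_and_count_negatives := by
  intro R _
  unfold Spec_double_elements_and_count_negatives double_elements_and_count_negatives
  simp only []
  rw [PySem.List.foldl_pyRange_zero_pyGetD R 0
        (fun (acc : List Int × Int) x =>
          (acc.1 ++ [x * 2], if x < 0 then acc.2 + 1 else acc.2)) ([], 0)]
  rw [PySem.List.foldl_prod_mk (f := fun acc x => acc ++ [x * 2])
        (g := fun acc x => if x < 0 then acc + 1 else acc)]
  rw [PySem.List.foldl_append_singleton_eq_map, PySem.List.foldl_ite_add_one]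
  rw [alt_eq_map_countP]
  simp
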